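-- pv_equiv track=rewrite | github.com/scottshowers/xlr8 | backend/utils/intelligence/consultative_templates.py | _select_display_columns
-- ===== SOURCE A (Python) =====
-- from typing import Dict, List, Optional, Any
--
-- def _select_display_columns(columns: List[str]) -> List[str]:
--     """Select the most meaningful columns to display."""
--     if not columns:
--         return []
--
--     # Priority columns (things users care about)
--     priority_patterns = [
--         'name', 'employee', 'description', 'desc', 'title',
--         'code', 'id', 'number', 'status', 'type',
--         'department', 'location', 'company'
--     ]
--
--     # Skip boring columns
--     skip_patterns = ['created', 'updated', 'modified', 'timestamp', 'uuid', 'hash']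
--
--     priority = []
--     regular = []
--
--     for col in columns:
--         col_lower = col.lower()
--
--         # Skip boring columns
--         if any(skip in col_lower for skip in skip_patterns):
--             continue
--
--         # Prioritize interesting columns
--         if any(prio in col_lower for prio in priority_patterns):
--             priority.append(col)
--         else:
--             regular.append(col)
--
--     return priority + regular
-- ===== SOURCE B (Python) =====
-- from typing import Dict, List, Optional, Any
--
-- def _select_display_columns(columns: List[str]) -> List[str]:
--     """Select the most meaningful columns to display."""
--     priority_patterns = [
--         'name', 'employee', 'description', 'desc', 'title',
--         'code', 'id', 'number', 'status', 'type',
--         'department', 'location', 'company'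
--     ]
--     skip_patterns = ['created', 'updated', 'modified', 'timestamp', 'uuid', 'hash']
--
--     kept = [c for c in columns
--             if not any(s in c.lower() for s in skip_patterns)]
--     # Stable sort: priority columns (key 0) first, others (key 1) after,
--     # each group keeping its input order.
--     return sorted(kept, key=lambda c: 0 if any(p in c.lower()
--                                                for p in priority_patterns) else 1)
-- ===== Notes on version B (the rewrite author's own statement) =====
-- stated objective: alternative
-- what changed: Replaces the two-bucket partition loop by a filter of skip-free columns followed by a stable sort on a 0/1 priority key (stability preserves input order within each group).
import Mathlib
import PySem

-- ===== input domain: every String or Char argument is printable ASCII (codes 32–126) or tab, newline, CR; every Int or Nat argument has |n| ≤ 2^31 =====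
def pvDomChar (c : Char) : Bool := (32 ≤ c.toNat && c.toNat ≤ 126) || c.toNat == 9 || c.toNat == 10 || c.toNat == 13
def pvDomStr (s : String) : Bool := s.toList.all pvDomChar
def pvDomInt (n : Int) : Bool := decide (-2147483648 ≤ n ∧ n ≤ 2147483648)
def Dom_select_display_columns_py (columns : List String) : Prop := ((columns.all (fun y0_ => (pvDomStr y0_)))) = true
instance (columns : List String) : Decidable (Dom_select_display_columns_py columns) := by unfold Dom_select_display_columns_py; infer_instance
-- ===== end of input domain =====

-- B replaces A's two-bucket partition loop with a skip-filter plus a stable sort on a 0/1 priority key (alternative decomposition, same cost).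


-- ===== PORT A =====
-- pattern lists shared by both ports (same literals as both Pythons)
def pvPrioPatterns : List String :=
  ["name", "employee", "description", "desc", "title",
   "code", "id", "number", "status", "type",
   "department", "location", "company"]

def pvSkipPatterns : List String :=
  ["created", "updated", "modified", "timestamp", "uuid", "hash"]

-- port of A: early return on [], then one loop keeping two accumulator buckets
def select_display_columns_py (columns : List String) : List String :=
  if columns = [] then []
  else
    let st := columns.foldl (fun (acc : List String × List String) col =>
      let col_lower := PySem.Str.lower col
      if pvSkipPatterns.any (fun skip => PySem.Str.isIn skip col_lower) then acc
      else if pvPrioPatterns.any (fun prio => PySem.Str.isIn prio col_lower) then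
        (acc.1 ++ [col], acc.2)
      else (acc.1, acc.2 ++ [col])) ([], [])
    st.1 ++ st.2

-- ===== PORT B =====
-- port of B: filter out skip-pattern columns, then stable-sort by a 0/1 priority key
def pvPrioKey (c : String) : Int :=
  if pvPrioPatterns.any (fun p => PySem.Str.isIn p (PySem.Str.lower c)) then 0 else 1

def select_display_columns_py_alt (columns : List String) : List String :=
  let kept := columns.filter
    (fun c => !(pvSkipPatterns.any (fun s => PySem.Str.isIn s (PySem.Str.lower c))))
  PySem.List.sorted kept pvPrioKey

-- ===== PRECONDITION & SPEC =====
def Spec_select_display_columns_py (columns : List String) (out : List String) : Prop := out = select_display_columns_py_alt columns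
instance (columns : List String) (out : List String) : Decidable (Spec_select_display_columns_py columns out) := by unfold Spec_select_display_columns_py; infer_instance

-- ===== CLAIM (what is proved, stated in full; the proofs are below) =====
def Claim_equal_select_display_columns_py : Prop := ∀ (columns : List String), Dom_select_display_columns_py columns → Spec_select_display_columns_py columns (select_display_columns_py columns)

-- ===== LEMMAS AND PROOFS =====

-- insertBy walks past every element it is not 'before'
lemma insertBy_append_of_not {α : Type} (before : α → α → Bool) (x : α)
    (A B : List α) (hA : ∀ a ∈ A, before x a = false) :
    PySem.List.insertBy before x (A ++ B) = A ++ PySem.List.insertBy before x B := by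
  induction A with
  | nil => rfl
  | cons a as ih =>
    have ha := hA a (by simp)
    simp [PySem.List.insertBy, ha, ih (fun a h => hA a (by simp [h]))]

-- insertBy stops at once when it is 'before' every element
lemma insertBy_of_forall_before {α : Type} (before : α → α → Bool) (x : α)
    (B : List α) (hB : ∀ b ∈ B, before x b = true) :
    PySem.List.insertBy before x B = x :: B := by
  cases B with
  | nil => rfl
  | cons b bs => simp [PySem.List.insertBy, hB b (by simp)]

-- stable insertion sort on a {0,1}-valued key is the stable two-way partition
lemma foldl_insertBy_two_key {α : Type} (k : α → Int) (hk : ∀ c, k c = 0 ∨ k c = 1) :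
    ∀ (xs A B : List α), (∀ a ∈ A, k a = 0) → (∀ b ∈ B, k b = 1) →
      xs.foldl (fun acc x => PySem.List.insertBy (fun a b => decide (k a < k b)) x acc) (A ++ B)
        = (A ++ xs.filter (fun c => k c == 0)) ++ (B ++ xs.filter (fun c => k c == 1)) := by
  intro xs
  induction xs with
  | nil => intro A B _ _; simp
  | cons x xs ih =>
    intro A B hA hB
    simp only [List.foldl_cons]
    rcases hk x with hx | hx
    · have h1 : PySem.List.insertBy (fun a b => decide (k a < k b)) x (A ++ B)
          = (A ++ [x]) ++ B := by
        rw [insertBy_append_of_not _ _ _ _ (fun a ha => by simp [hx, hA a ha]),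
            insertBy_of_forall_before _ _ _ (fun b hb => by simp [hx, hB b hb])]
        simp
      rw [h1, ih (A ++ [x]) B (by intro a ha; rcases List.mem_append.1 ha with h | h
                                  · exact hA a h
                                  · simp_all) hB]
      simp [hx]
    · have hno : ∀ y ∈ A ++ B, (decide (k x < k y)) = false := by
        intro y hy
        rcases hk y with h0 | h0 <;> simp [hx, h0]
      have h1 : PySem.List.insertBy (fun a b => decide (k a < k b)) x (A ++ B)
          = A ++ (B ++ [x]) := by
        rw [PySem.List.insertBy_of_forall_not_before _ _ _ hno]; simp
      rw [h1, ih A (B ++ [x]) hA (by intro b hb; rcases List.mem_append.1 hb with h | h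
                                     · exact hB b h
                                     · simp_all)]
      simp [hx]

lemma sorted_two_key {α : Type} (k : α → Int) (hk : ∀ c, k c = 0 ∨ k c = 1) (xs : List α) :
    PySem.List.sorted xs k = xs.filter (fun c => k c == 0) ++ xs.filter (fun c => k c == 1) := by
  rw [PySem.List.sorted_eq_foldl_insertBy]
  simpa using foldl_insertBy_two_key k hk xs [] [] (by simp) (by simp)

-- A's two-bucket loop, for abstract skip/priority tests, is a pair of filters
lemma partition_fold {α : Type} (sk pr? : α → Bool) (xs : List α) : ∀ (pr rg : List α),
    xs.foldl (fun (acc : List α × List α) col =>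
        if sk col then acc
        else if pr? col then (acc.1 ++ [col], acc.2)
        else (acc.1, acc.2 ++ [col])) (pr, rg)
      = (pr ++ xs.filter (fun c => !sk c && pr? c),
         rg ++ xs.filter (fun c => !sk c && !pr? c)) := by
  induction xs with
  | nil => intro pr rg; simp
  | cons x xs ih =>
    intro pr rg
    simp only [List.foldl_cons, List.filter_cons]
    cases hs : sk x
    · cases hp : pr? x <;> simp [ih]
    · simp [ih]

-- ===== VERDICT (by name: the statement is the Claim_ definition above) =====
theorem select_display_columns_py_spec : Claim_equal_select_display_columns_py := by
  intro columns _
  unfold Spec_select_display_columns_py select_display_columns_py select_display_columns_py_alt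
  rcases columns with _ | ⟨c, cs⟩
  · rfl
  · simp only [reduceCtorEq, if_false]
    have hA := partition_fold
      (fun col => pvSkipPatterns.any (fun skip => PySem.Str.isIn skip (PySem.Str.lower col)))
      (fun col => pvPrioPatterns.any (fun prio => PySem.Str.isIn prio (PySem.Str.lower col)))
      (c :: cs) [] []
    rw [show ((c :: cs).foldl (fun (acc : List String × List String) col =>
          let col_lower := PySem.Str.lower col
          if pvSkipPatterns.any (fun skip => PySem.Str.isIn skip col_lower) then acc
          else if pvPrioPatterns.any (fun prio => PySem.Str.isIn prio col_lower) then
            (acc.1 ++ [col], acc.2)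
          else (acc.1, acc.2 ++ [col])) ([], [])) = _ from hA]
    rw [sorted_two_key pvPrioKey (fun c => by unfold pvPrioKey; split <;> simp)]
    simp only [List.filter_filter, List.nil_append]
    congr 1 <;> (apply List.filter_congr; intro y _;
                 simp only [pvPrioKey];
                 cases h : pvPrioPatterns.any (fun p => PySem.Str.isIn p (PySem.Str.lower y)) <;>
                 cases hs : pvSkipPatterns.any (fun s => PySem.Str.isIn s (PySem.Str.lower y)) <;> rfl)
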